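-- pv_equiv track=rewrite | github.com/DannyZednickova/_DIPLOMKA | CTI_Code/middleware_to_neo/NewOpenvasToNEO.py | stix_type_to_label
-- ===== SOURCE A (Python) =====
-- def stix_type_to_label(stix_type: str) -> str:
--     mapping = {
--         "malware": "Malware",
--         "attack-pattern": "AttackPattern",
--         "intrusion-set": "IntrusionSet",
--         "vulnerability": "Vulnerability",
--         "threat-actor": "ThreatActor",
--         "campaign": "Campaign",
--         "indicator": "Indicator",
--         "tool": "Tool",
--         "identity": "Identity",
--         "report": "Report",
--     }
--     return mapping.get(stix_type, "".join(p.capitalize() for p in stix_type.split("-")))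
-- ===== SOURCE B (Python) =====
-- def stix_type_to_label(stix_type: str) -> str:
--     return "".join(p.capitalize() for p in stix_type.split("-"))
-- ===== Notes on version B (the rewrite author's own statement) =====
-- stated objective: simpler
-- what changed: Dropped the 10-entry lookup table entirely: every table value equals what the fallback already computes, so B just splits on the hyphen, capitalizes each part and joins.
import Mathlib
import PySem

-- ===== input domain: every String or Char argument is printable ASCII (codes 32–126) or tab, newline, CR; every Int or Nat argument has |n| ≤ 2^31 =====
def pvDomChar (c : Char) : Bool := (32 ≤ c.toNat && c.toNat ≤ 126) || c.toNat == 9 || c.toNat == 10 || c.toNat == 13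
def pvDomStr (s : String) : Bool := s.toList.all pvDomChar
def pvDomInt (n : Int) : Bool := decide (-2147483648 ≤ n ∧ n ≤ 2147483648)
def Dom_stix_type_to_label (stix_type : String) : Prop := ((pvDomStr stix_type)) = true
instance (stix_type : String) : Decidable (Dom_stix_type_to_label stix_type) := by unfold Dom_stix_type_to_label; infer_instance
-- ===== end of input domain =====

-- B drops A's 10-entry lookup table (every table value equals the fallback computation) and computes the label directly; objective: simpler.

-- str.capitalize for ASCII: first char uppercased, the rest lowercased (exact on the ASCII domain)
def pyCapitalize (cs : List Char) : List Char :=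
  match cs with
  | [] => []
  | c :: rest => PySem.Chars.upperChar c :: rest.map PySem.Chars.lowerChar

-- ===== PORT A =====
def stix_type_to_label (stix_type : String) : String :=
  let mapping : PySem.Dict String String := PySem.Dict.mk
    [("malware", "Malware"), ("attack-pattern", "AttackPattern"),
     ("intrusion-set", "IntrusionSet"), ("vulnerability", "Vulnerability"),
     ("threat-actor", "ThreatActor"), ("campaign", "Campaign"),
     ("indicator", "Indicator"), ("tool", "Tool"),
     ("identity", "Identity"), ("report", "Report")]
  mapping.getD stix_type
    (String.ofList (PySem.Chars.join [] ((PySem.Chars.splitOn stix_type.toList ['-']).map pyCapitalize)))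

-- ===== PORT B =====
def stix_type_to_label_alt (stix_type : String) : String :=
  String.ofList (PySem.Chars.join [] ((PySem.Chars.splitOn stix_type.toList ['-']).map pyCapitalize))

-- ===== PRECONDITION & SPEC =====
def Spec_stix_type_to_label (stix_type : String) (out : String) : Prop := out = stix_type_to_label_alt stix_type
instance (stix_type : String) (out : String) : Decidable (Spec_stix_type_to_label stix_type out) := by unfold Spec_stix_type_to_label; infer_instance

-- ===== CLAIM (what is proved, stated in full; the proofs are below) =====
def Claim_equal_stix_type_to_label : Prop := ∀ (stix_type : String), Dom_stix_type_to_label stix_type → Spec_stix_type_to_label stix_type (stix_type_to_label stix_type)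

-- ===== LEMMAS AND PROOFS =====

-- ===== VERDICT (by name: the statement is the Claim_ definition above) =====
theorem stix_type_to_label_spec : Claim_equal_stix_type_to_label := by
  intro s _
  unfold Spec_stix_type_to_label
  by_cases h1 : s = "malware"; · subst h1; decide
  by_cases h2 : s = "attack-pattern"; · subst h2; decide
  by_cases h3 : s = "intrusion-set"; · subst h3; decide
  by_cases h4 : s = "vulnerability"; · subst h4; decide
  by_cases h5 : s = "threat-actor"; · subst h5; decide
  by_cases h6 : s = "campaign"; · subst h6; decide
  by_cases h7 : s = "indicator"; · subst h7; decide
  by_cases h8 : s = "tool"; · subst h8; decide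
  by_cases h9 : s = "identity"; · subst h9; decide
  by_cases h10 : s = "report"; · subst h10; decide
  simp [stix_type_to_label, stix_type_to_label_alt, PySem.Dict.getD,
    PySem.Dict.get?,
    Ne.symm h1, Ne.symm h2, Ne.symm h3, Ne.symm h4, Ne.symm h5,
    Ne.symm h6, Ne.symm h7, Ne.symm h8, Ne.symm h9, Ne.symm h10]
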